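-- pv_equiv track=rewrite | github.com/tomaszkajda/wdi2020-2021 | wdi2/cw13.py | cw13
-- ===== SOURCE A (Python) =====
-- def cw13(n):
--     last = n % 10
--     n //= 10
--     while n > 0:
--         if last == n % 10:
--             return False
--         else:
--             n //= 10
--     return True
-- ===== SOURCE B (Python) =====
-- def cw13(n):
--     if n <= 0:
--         return True
--     s = str(n)
--     return s[-1] not in s[:-1]
-- ===== Notes on version B (the rewrite author's own statement) =====
-- stated objective: idiomatic
-- what changed: Replaces A's arithmetic floor-division/modulus digit-scanning loop with a loop-free string formulation: convert n to its decimal string once and test whether the last character occurs in the preceding characters.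
import Mathlib
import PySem

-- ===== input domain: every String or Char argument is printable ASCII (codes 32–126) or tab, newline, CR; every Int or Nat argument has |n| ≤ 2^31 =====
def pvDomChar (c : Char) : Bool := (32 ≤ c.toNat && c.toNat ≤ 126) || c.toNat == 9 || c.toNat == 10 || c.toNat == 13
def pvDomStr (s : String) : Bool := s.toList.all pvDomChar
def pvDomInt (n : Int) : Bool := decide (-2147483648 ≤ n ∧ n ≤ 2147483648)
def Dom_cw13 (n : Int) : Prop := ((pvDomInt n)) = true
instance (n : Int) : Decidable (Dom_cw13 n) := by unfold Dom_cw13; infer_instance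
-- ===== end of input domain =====

-- B drops A's arithmetic digit-extraction loop entirely: it converts n to its decimal string once
-- and asks whether the last character occurs in the rest of the string (objective: idiomatic).

-- ===== PORT A =====
-- the 'while n > 0' loop of A: early return False on a digit equal to last
def cw13Loop (last m : Int) : Bool :=
  if _h : m > 0 then
    if last == PySem.Int.mod m 10 then false
    else cw13Loop last (PySem.Int.floordiv m 10)
  else true
termination_by m.toNat
decreasing_by
  rw [PySem.Int.floordiv_eq_ediv_of_pos (by omega : (0:Int) < 10)]
  omega

def cw13 (n : Int) : Bool :=
  cw13Loop (PySem.Int.mod n 10) (PySem.Int.floordiv n 10)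

-- ===== PORT B =====
def cw13_alt (n : Int) : Bool :=
  if n ≤ 0 then true
  else
    let s := PySem.Int.toStr n
    -- s[-1]; the default is unreachable: str(n) is nonempty for n > 0
    let c := (PySem.Str.pyGet? s (-1)).getD '0'
    -- s[-1] not in s[:-1]
    !(PySem.Str.isIn (String.ofList [c]) (PySem.Str.slice s none (some (-1))))

-- ===== PRECONDITION & SPEC =====
def Spec_cw13 (n : Int) (out : Bool) : Prop := out = cw13_alt n
instance (n : Int) (out : Bool) : Decidable (Spec_cw13 n out) := by unfold Spec_cw13; infer_instance

-- ===== CLAIM (what is proved, stated in full; the proofs are below) =====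
def Claim_equal_cw13 : Prop := ∀ (n : Int), Dom_cw13 n → Spec_cw13 n (cw13 n)

-- ===== LEMMAS AND PROOFS =====

-- Nat.toDigitsCore with sufficient fuel produces the base-10 digit characters, most significant first
theorem toDigitsCore_eq (f : Nat) : ∀ (n : Nat) (acc : List Char), n ≤ f →
    Nat.toDigitsCore 10 (f + 1) n acc =
      (if n = 0 then ['0'] else ((Nat.digits 10 n).map Nat.digitChar).reverse) ++ acc := by
  induction f with
  | zero =>
    intro n acc h
    interval_cases n
    simp [Nat.toDigitsCore]
    decide
  | succ f ih =>
    intro n acc h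
    rw [Nat.toDigitsCore]
    by_cases h0 : n = 0
    · simp [h0]
      decide
    · by_cases h1 : n / 10 = 0
      · have hd : Nat.digits 10 n = [n % 10] := by
          rw [Nat.digits_def' (by norm_num) (Nat.pos_of_ne_zero h0), h1]
          simp
        simp [h1, hd, h0]
      · have hlt : n / 10 ≤ f := by omega
        rw [if_neg h1, ih (n / 10) _ hlt, if_neg h1,
          Nat.digits_def' (by norm_num) (Nat.pos_of_ne_zero h0)]
        simp [if_neg h0]

-- str(n) for positive n spells the decimal digits of n, most significant first
theorem toChars_pos (n : Int) (h : 0 < n) :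
    PySem.Int.toChars n = ((Nat.digits 10 n.toNat).map Nat.digitChar).reverse := by
  have hm : n.toNat ≠ 0 := by omega
  rw [PySem.Int.toChars, if_neg (by omega), Nat.toDigits,
    toDigitsCore_eq n.toNat n.toNat [] le_rfl, if_neg hm, List.append_nil]

-- A's loop decides that last occurs among the base-10 digits of m
theorem cw13Loop_eq (m : Nat) (last : Int) :
    cw13Loop last (m : Int)
      = !(((Nat.digits 10 m).map (fun d : Nat => (d : Int))).contains last) := by
  induction m using Nat.strong_induction_on with
  | _ m ih =>
    rw [cw13Loop]
    by_cases h0 : m = 0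
    · subst h0; simp
    · have hpos : 0 < m := Nat.pos_of_ne_zero h0
      rw [dif_pos (by exact_mod_cast hpos)]
      have hmod : PySem.Int.mod (m : Int) 10 = ((m % 10 : Nat) : Int) := by
        rw [PySem.Int.mod_eq_emod_of_pos (by omega)]; push_cast; ring
      have hdiv : PySem.Int.floordiv (m : Int) 10 = ((m / 10 : Nat) : Int) := by
        rw [PySem.Int.floordiv_eq_ediv_of_pos (by omega)]; push_cast; ring
      rw [hmod, hdiv, Nat.digits_def' (by norm_num) hpos]
      by_cases he : last = ((m % 10 : Nat) : Int)
      · simp [he]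
      · rw [if_neg (by simpa using he), ih (m / 10) (Nat.div_lt_self hpos (by norm_num))]
        simp
        intro _
        push_cast at he
        exact he

theorem cw13Loop_nonpos (last m : Int) (h : m ≤ 0) : cw13Loop last m = true := by
  rw [cw13Loop]
  simp [show ¬ m > 0 by omega]

-- xs[-1] of a list ending in x is x
theorem pyGet_concat_neg_one {α : Type} (L : List α) (x d : α) :
    (PySem.List.pyGet? (L ++ [x]) (-1)).getD d = x := by
  rw [PySem.List.pyGet?_neg_ofNat (L ++ [x]) 1 (by omega) (by simp)]
  simp

-- digitChar is injective below 10, so membership transfers through the map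
theorem mem_digitChar_map_iff (k : Nat) (hk : k < 10) (l : List Nat)
    (hl : ∀ a ∈ l, a < 10) : Nat.digitChar k ∈ l.map Nat.digitChar ↔ k ∈ l := by
  constructor
  · intro h
    obtain ⟨a, ha, he⟩ := List.mem_map.mp h
    have : ∀ a < 10, ∀ b < 10, Nat.digitChar a = Nat.digitChar b → a = b := by decide
    rwa [this a (hl a ha) k hk he] at ha
  · exact fun h => List.mem_map_of_mem h

-- ===== VERDICT (by name: the statement is the Claim_ definition above) =====
theorem cw13_spec : Claim_equal_cw13 := by
  intro n _
  unfold Spec_cw13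
  by_cases hn : n ≤ 0
  · have h1 : cw13_alt n = true := by unfold cw13_alt; rw [if_pos hn]
    have h2 : cw13 n = true := by
      apply cw13Loop_nonpos
      rw [PySem.Int.floordiv_eq_ediv_of_pos (by omega : (0:Int) < 10)]
      omega
    rw [h1, h2]
  · rw [not_le] at hn
    have hmpos : 0 < n.toNat := by omega
    have hmod : PySem.Int.mod n 10 = ((n.toNat % 10 : Nat) : Int) := by
      rw [PySem.Int.mod_eq_emod_of_pos (by omega)]; omega
    have hdiv : PySem.Int.floordiv n 10 = ((n.toNat / 10 : Nat) : Int) := by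
      rw [PySem.Int.floordiv_eq_ediv_of_pos (by omega)]; omega
    have hA : cw13 n
        = !(((Nat.digits 10 (n.toNat / 10)).map (fun d : Nat => (d : Int))).contains
            ((n.toNat % 10 : Nat) : Int)) := by
      unfold cw13
      rw [hmod, hdiv, cw13Loop_eq]
    have hs : (PySem.Int.toStr n).toList
        = ((Nat.digits 10 (n.toNat / 10)).map Nat.digitChar).reverse
            ++ [Nat.digitChar (n.toNat % 10)] := by
      rw [PySem.Int.toList_toStr, toChars_pos n hn, Nat.digits_def' (by norm_num) hmpos]
      simp
    have hc : (PySem.Str.pyGet? (PySem.Int.toStr n) (-1)).getD '0'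
        = Nat.digitChar (n.toNat % 10) := by
      rw [PySem.Str.pyGet?_eq, PySem.Chars.pyGet?_eq_listPyGet?, hs, pyGet_concat_neg_one]
    have hslice : (PySem.Str.slice (PySem.Int.toStr n) none (some (-1))).toList
        = ((Nat.digits 10 (n.toNat / 10)).map Nat.digitChar).reverse := by
      rw [PySem.Str.slice_to_neg_one, hs, List.dropLast_concat]
    have hB : cw13_alt n
        = !(PySem.Str.isIn (String.ofList [Nat.digitChar (n.toNat % 10)])
            (PySem.Str.slice (PySem.Int.toStr n) none (some (-1)))) := by
      unfold cw13_alt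
      rw [if_neg (by omega)]
      show (!PySem.Str.isIn
          (String.ofList [(PySem.Str.pyGet? (PySem.Int.toStr n) (-1)).getD '0'])
          (PySem.Str.slice (PySem.Int.toStr n) none (some (-1)))) = _
      rw [hc]
    rw [hA, hB]
    apply congrArg
    apply Bool.coe_iff_coe.mp
    rw [List.contains_iff_mem,
      List.mem_map_of_injective (fun a b h => by simpa using h : Function.Injective (fun d : Nat => (d : Int))),
      PySem.Str.isIn_iff_infix, hslice]
    have hsub : (String.ofList [Nat.digitChar (n.toNat % 10)]).toList
        = [Nat.digitChar (n.toNat % 10)] := by simp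
    rw [hsub, List.singleton_infix_iff, List.mem_reverse,
      mem_digitChar_map_iff _ (Nat.mod_lt _ (by norm_num)) _
        (fun a ha => Nat.digits_lt_base (by norm_num) ha)]
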